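-- pv_equiv track=rewrite | github.com/Edward-959/MachineLearningFramework | tfModelMultiCNNAttentionBiLSTMBigMultiTagPriceFeature/MainTrainModelNN_CustomBackTest.py | paraGroup
-- ===== SOURCE A (Python) =====
-- import math
--
-- def paraGroup(paraMat, processNum):
--     def multiFor(paraMat2, paraAll2, paraTemp3, index2=0):
--         if index2 < paraMat2.__len__() - 1:
--             for i in range(paraMat2[index2].__len__()):
--                 paraTemp2 = paraTemp3[:]
--                 paraTemp2.append(paraMat2[index2][i])
--                 multiFor(paraMat2, paraAll2, paraTemp2, index2 + 1)
--         else: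
--             for i in range(paraMat2[index2].__len__()):
--                 paraTemp2 = paraTemp3[:]
--                 paraTemp2.append(paraMat2[index2][i])
--                 paraAll2.append(paraTemp2)
--
--     paraAll = []
--     paraTemp = []
--     multiFor(paraMat, paraAll, paraTemp, index2=0)
--
--     taskNumPerProcess = math.ceil(paraAll.__len__() / processNum)
--
--     index = 0
--
--     paraInProcess = []
--     while index < paraAll.__len__():
--         paraInProcess.append(paraAll[index:index + taskNumPerProcess])
--         index += taskNumPerProcess
--     processNum = paraInProcess.__len__()
--     return paraInProcess, processNum
-- ===== SOURCE B (Python) =====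
-- import math
--
-- def paraGroup(paraMat, processNum):
--     # iterative Cartesian product in lexicographic order
--     paraAll = [[]]
--     for row in paraMat:
--         paraAll = [p + [x] for p in paraAll for x in row]
--     taskNumPerProcess = math.ceil(len(paraAll) / processNum)
--     paraInProcess = []
--     rest = paraAll
--     while rest:
--         paraInProcess.append(rest[:taskNumPerProcess])
--         rest = rest[taskNumPerProcess:]
--     return paraInProcess, len(paraInProcess)
-- ===== Notes on version B (the rewrite author's own statement) =====
-- stated objective: simpler
-- what changed: The recursive multiFor building combinations via an index and a shared accumulator is replaced by a flat iterative product (paraAll = [p+[x] for p in paraAll for x in row]), and the index-stepping chunk loop by slicing chunks off the front of the remaining list.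
import Mathlib
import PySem

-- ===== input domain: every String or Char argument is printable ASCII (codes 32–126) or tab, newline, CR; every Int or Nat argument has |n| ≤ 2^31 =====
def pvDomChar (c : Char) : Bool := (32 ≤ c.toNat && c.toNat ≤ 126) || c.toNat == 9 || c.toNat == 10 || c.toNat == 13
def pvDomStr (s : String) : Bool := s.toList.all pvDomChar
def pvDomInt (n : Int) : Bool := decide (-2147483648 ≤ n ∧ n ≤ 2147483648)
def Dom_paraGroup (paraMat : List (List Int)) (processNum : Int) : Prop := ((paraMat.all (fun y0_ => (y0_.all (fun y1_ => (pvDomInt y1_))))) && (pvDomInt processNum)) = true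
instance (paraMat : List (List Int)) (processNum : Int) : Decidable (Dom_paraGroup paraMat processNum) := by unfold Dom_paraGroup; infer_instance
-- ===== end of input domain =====

-- B replaces the recursive index-based multiFor by an iterative flat product and slices
-- chunks off the front of the list instead of stepping an index (objective: simpler).


-- ===== PORT A =====
-- multiFor, recursing on the suffix of rows from index2 on (index2 < len-1 ↔ at least two
-- rows remain). Python indexes paraMat2[index2] out of range when paraMat2 = []; that input
-- (IndexError) is excluded by Pre_, the port returns the accumulator there.
def multiForA : List (List Int) → List (List Int) → List Int → List (List Int)
  | [], paraAll2, _ => paraAll2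
  | [row], paraAll2, paraTemp3 =>
      row.foldl (fun acc x => acc ++ [paraTemp3 ++ [x]]) paraAll2
  | row :: r1 :: rs, paraAll2, paraTemp3 =>
      row.foldl (fun acc x => multiForA (r1 :: rs) acc (paraTemp3 ++ [x])) paraAll2

-- the while loop: index stepping by taskNumPerProcess. The fuel argument (called with the
-- list length, enough for every terminating run) and the `0 < t` guard only make the port
-- total: Python loops forever when the step is ≤ 0 and the list nonempty (excluded by Pre_).
def chunkA (paraAll : List (List Int)) (t : Int) : Nat → Nat → List (List (List Int))
  | _, 0 => []
  | index, fuel + 1 =>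
      if index < paraAll.length ∧ 0 < t then
        PySem.List.slice paraAll (some (index : Int)) (some ((index : Int) + t)) ::
          chunkA paraAll t (index + t.toNat) fuel
      else []

def paraGroup (paraMat : List (List Int)) (processNum : Int) : List (List (List Int)) × Int :=
  let paraAll := multiForA paraMat [] []
  -- math.ceil(a / b) on ints is -((-a) // b)
  let taskNumPerProcess := -(PySem.Int.floordiv (-(paraAll.length : Int)) processNum)
  let paraInProcess := chunkA paraAll taskNumPerProcess 0 paraAll.length
  (paraInProcess, (paraInProcess.length : Int))

-- ===== PORT B =====
def prodStep (acc : List (List Int)) (row : List Int) : List (List Int) :=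
  acc.flatMap (fun p => row.map (fun x => p ++ [x]))

-- B's while loop slices chunks off the front; same totality fuel/guard for step ≤ 0
def chunksB (t : Int) : Nat → List (List Int) → List (List (List Int))
  | 0, _ => []
  | fuel + 1, rest =>
      if rest ≠ [] ∧ 0 < t then
        rest.take t.toNat :: chunksB t fuel (rest.drop t.toNat)
      else []

def paraGroup_alt (paraMat : List (List Int)) (processNum : Int) : List (List (List Int)) × Int :=
  let paraAll := paraMat.foldl prodStep [[]]
  let taskNumPerProcess := -(PySem.Int.floordiv (-(paraAll.length : Int)) processNum)
  let paraInProcess := chunksB taskNumPerProcess paraAll.length paraAll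
  (paraInProcess, (paraInProcess.length : Int))

-- ===== PRECONDITION & SPEC =====
-- Pre_ = exactly where Python A returns: paraMat = [] raises IndexError, processNum = 0
-- raises ZeroDivisionError, and processNum < 0 loops forever unless some row is empty
-- (then the product is empty and the while loop never starts).
def Pre_paraGroup (paraMat : List (List Int)) (processNum : Int) : Prop :=
  paraMat ≠ [] ∧ processNum ≠ 0 ∧ (0 < processNum ∨ [] ∈ paraMat)
instance (paraMat : List (List Int)) (processNum : Int) : Decidable (Pre_paraGroup paraMat processNum) := by unfold Pre_paraGroup; infer_instance
def pvWitness_paraGroup : List (List Int) × Int := ([[1, 2], [3]], 2)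

def Spec_paraGroup (paraMat : List (List Int)) (processNum : Int) (out : List (List (List Int)) × Int) : Prop := out = paraGroup_alt paraMat processNum
instance (paraMat : List (List Int)) (processNum : Int) (out : List (List (List Int)) × Int) : Decidable (Spec_paraGroup paraMat processNum out) := by unfold Spec_paraGroup; infer_instance

-- ===== CLAIM (what is proved, stated in full; the proofs are below) =====
def Claim_equal_paraGroup : Prop := ∀ (paraMat : List (List Int)) (processNum : Int), Dom_paraGroup paraMat processNum → Pre_paraGroup paraMat processNum → Spec_paraGroup paraMat processNum (paraGroup paraMat processNum)

-- ===== LEMMAS AND PROOFS =====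
-- the Cartesian product of the rows, head row outermost (lexicographic order)
def piProd : List (List Int) → List (List Int)
  | [] => [[]]
  | row :: rest => row.flatMap (fun x => (piProd rest).map (fun t => x :: t))

lemma prodB_eq (rows : List (List Int)) (acc : List (List Int)) :
    rows.foldl prodStep acc = acc.flatMap (fun p => (piProd rows).map (fun t => p ++ t)) := by
  induction rows generalizing acc with
  | nil => simp [piProd]
  | cons row rest ih =>
      simp only [List.foldl_cons, ih, prodStep, piProd]
      simp [List.flatMap_assoc, List.flatMap_map, List.map_flatMap, List.map_map,
        Function.comp_def, List.append_assoc]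

lemma multiA_eq (rows : List (List Int)) (acc : List (List Int)) (temp : List Int)
    (h : rows ≠ []) :
    multiForA rows acc temp = acc ++ (piProd rows).map (fun t => temp ++ t) := by
  induction rows generalizing acc temp with
  | nil => exact absurd rfl h
  | cons row rest ih =>
      cases rest with
      | nil =>
          simp [multiForA, piProd, List.flatMap_def, List.map_map, Function.comp_def]
      | cons r1 rs =>
          have ih' : ∀ (a : List (List Int)) (tm : List Int),
              multiForA (r1 :: rs) a tm = a ++ (piProd (r1 :: rs)).map (fun t => tm ++ t) :=
            fun a tm => ih a tm (by simp)
          simp only [multiForA, ih']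
          rw [PySem.List.foldl_append_eq_flatMap]
          simp [piProd, List.map_flatMap, List.map_map, Function.comp_def, List.append_assoc]

lemma chunk_eq (lst : List (List Int)) (t : Int) :
    ∀ (fuel fuel' i : Nat), lst.length - i ≤ fuel → lst.length - i ≤ fuel' →
      chunkA lst t i fuel = chunksB t fuel' (lst.drop i) := by
  intro fuel
  induction fuel with
  | zero =>
      intro fuel' i h _
      have hd : lst.drop i = [] := by
        rw [List.drop_eq_nil_iff]; omega
      cases fuel' <;> simp [chunkA, chunksB, hd]
  | succ fuel ih =>
      intro fuel' i h h'
      by_cases hc : i < lst.length ∧ 0 < t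
      · obtain ⟨f2, rfl⟩ : ∃ f, fuel' = f + 1 := by
          cases fuel' with
          | zero => exact absurd h' (by omega)
          | succ f => exact ⟨f, rfl⟩
        have hdne : lst.drop i ≠ [] := by
          rw [ne_eq, List.drop_eq_nil_iff]; omega
        rw [chunkA, chunksB, if_pos hc, if_pos ⟨hdne, hc.2⟩]
        rw [ih f2 (i + t.toNat) (by omega) (by omega), List.drop_drop]
        have ht : ((i : Int) + t) = (i : Int) + ((t.toNat : Nat) : Int) := by omega
        rw [ht, PySem.List.slice_natCast_add]
      · cases fuel' <;> rw [chunkA, chunksB] <;> simp [if_neg hc]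

-- ===== VERDICT (by name: the statement is the Claim_ definition above) =====
theorem paraGroup_spec : Claim_equal_paraGroup := by
  intro paraMat processNum _ hpre
  obtain ⟨hne, -, -⟩ := hpre
  simp only [Spec_paraGroup, paraGroup, paraGroup_alt]
  rw [multiA_eq paraMat [] [] hne, prodB_eq]
  simp only [List.nil_append, List.flatMap_cons, List.flatMap_nil, List.append_nil,
    List.map_id']
  rw [chunk_eq (piProd paraMat)
    (-(PySem.Int.floordiv (-((piProd paraMat).length : Int)) processNum))
    (piProd paraMat).length (piProd paraMat).length 0 (by omega) (by omega)]
  simp
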